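-- pv_equiv track=rewrite | github.com/IPLOID/Lesson-1 | Work 1.4.py | bananas
-- ===== SOURCE A (Python) =====
-- def bananas(s) -> set:
--     result = set()
--     count = 0
--     length = len(s)
--     if length == 6 and s == 'banana':
--         result.add(s)
--     if length > 6:
--         for i in range(length-5) :
--                 for j in range(i+1,length-4):
--                     for k in range(j+1,length-3):
--                         for l in range(k+1,length-2):
--                             for m in range(l+1,length-1):
--                                 for n in range(m+1,length):
--                                     if s[i]+s[j]+s[k]+s[l]+s[m]+s[n] == 'banana':
--                                         hw = s
--                                         for zz in range(length):
--                                             for z in [i,j,k,l,m,n]: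
--                                                 if zz == z:
--                                                     break
--                                                 elif zz != z and (z > zz or n <zz):
--                                                     hw = hw[:zz] + "-" + hw[zz+1:]
--                                                     break
--                                         result.add(hw)
--                                         count = count + 1
--     return result
-- ===== SOURCE B (Python) =====
-- def bananas(s) -> set:
--     target = 'banana'
--     L = len(s)
--
--     def mask(picks):
--         return ''.join(c if i in picks else '-' for i, c in enumerate(s))
--
--     def rec(start, picks, rest):
--         if not rest:
--             return [mask(picks)]
--         words = []
--         for p in range(start, L - len(rest) + 1):
--             if s[p] == rest[0]:
--                 words.extend(rec(p + 1, picks + [p], rest[1:]))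
--         return words
--
--     return set(rec(0, [], target))
-- ===== Notes on version B (the rewrite author's own statement) =====
-- stated objective: faster
-- what changed: A tries all C(n,6) index 6-tuples in six nested loops and re-derives the masked string with another quadratic break-loop per hit; B recurses over the letters of 'banana', extending a position tuple only while its letters match, and masks with a single enumerate pass.
import Mathlib
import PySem

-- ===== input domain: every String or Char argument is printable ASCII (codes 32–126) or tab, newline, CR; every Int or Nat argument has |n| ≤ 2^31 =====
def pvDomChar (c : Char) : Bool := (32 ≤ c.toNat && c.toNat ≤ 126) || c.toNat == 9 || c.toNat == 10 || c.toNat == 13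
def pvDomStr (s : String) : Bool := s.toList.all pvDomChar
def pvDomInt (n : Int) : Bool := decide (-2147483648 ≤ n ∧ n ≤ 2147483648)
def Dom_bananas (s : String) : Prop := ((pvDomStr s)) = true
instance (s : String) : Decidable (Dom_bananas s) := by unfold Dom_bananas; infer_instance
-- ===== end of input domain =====

-- B replaces A's six nested index loops over ALL 6-tuples by an output-sensitive recursion over
-- the letters of "banana" that only extends position tuples whose letters match so far.

-- ===== PORT A =====
-- A's inner `for z in [i,j,k,l,m,n]: if … break / elif … break` loop, for one position zz.
def bananasMaskStep (n zz : Int) (hw : List Char) : List Int → List Char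
  | [] => hw
  | z :: rest =>
    if zz = z then hw
    else if zz ≠ z ∧ (z > zz ∨ n < zz) then
      -- hw = hw[:zz] + "-" + hw[zz+1:]
      PySem.List.slice hw none (some zz) ++ ['-'] ++ PySem.List.slice hw (some (zz + 1)) none
    else bananasMaskStep n zz hw rest

-- A's `for zz in range(length): …` rebuilding of hw (strings handled as their character lists).
def bananasMask (cs : List Char) (i j k l m n length : Int) : List Char :=
  (PySem.List.pyRange 0 length).foldl (fun hw zz => bananasMaskStep n zz hw [i, j, k, l, m, n]) cs

def bananas (s : String) : List String :=
  let result : PySem.Set String := PySem.Set.empty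
  let length : Int := PySem.Str.len s
  let cs := s.toList
  let result := if length == 6 && s == "banana" then PySem.Set.add result s else result
  if length > 6 then
    (PySem.List.pyRange 0 (length - 5)).foldl (fun r i =>
      (PySem.List.pyRange (i + 1) (length - 4)).foldl (fun r j =>
        (PySem.List.pyRange (j + 1) (length - 3)).foldl (fun r k =>
          (PySem.List.pyRange (k + 1) (length - 2)).foldl (fun r l =>
            (PySem.List.pyRange (l + 1) (length - 1)).foldl (fun r m =>
              (PySem.List.pyRange (m + 1) length).foldl (fun r n =>
                -- s[i]+s[j]+s[k]+s[l]+s[m]+s[n] == 'banana', compared character by character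
                -- (the indices produced by the ranges are always in range, so pyGetD is exact)
                if [PySem.List.pyGetD cs i ' ', PySem.List.pyGetD cs j ' ', PySem.List.pyGetD cs k ' ',
                    PySem.List.pyGetD cs l ' ', PySem.List.pyGetD cs m ' ', PySem.List.pyGetD cs n ' ']
                   == ['b', 'a', 'n', 'a', 'n', 'a'] then
                  PySem.Set.add r (String.ofList (bananasMask cs i j k l m n length))
                else r) r) r) r) r) r) result
  else result

-- ===== PORT B =====
-- ''.join(c if i in picks else '-' for i, c in enumerate(s))
def bananasAltMask (cs : List Char) (picks : List Int) : List Char :=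
  (PySem.List.enumerate cs 0).map (fun p => if picks.contains p.1 then p.2 else '-')

-- rec(start, picks, rest) of Source B
def bananasAltRec (cs : List Char) (L : Int) (start : Int) (picks : List Int) : List Char → List String
  | [] => [String.ofList (bananasAltMask cs picks)]
  | c :: rest =>
    (PySem.List.pyRange start (L - ((rest.length : Int) + 1) + 1)).foldl
      (fun words p =>
        if PySem.List.pyGetD cs p ' ' == c then
          words ++ bananasAltRec cs L (p + 1) (picks ++ [p]) rest
        else words) []

def bananas_alt (s : String) : List String :=
  PySem.Set.ofList (bananasAltRec s.toList (PySem.Str.len s) 0 [] "banana".toList)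

-- ===== PRECONDITION & SPEC =====
def Spec_bananas (s : String) (out : List String) : Prop := out = bananas_alt s
instance (s : String) (out : List String) : Decidable (Spec_bananas s out) := by unfold Spec_bananas; infer_instance

-- ===== CLAIM (what is proved, stated in full; the proofs are below) =====
def Claim_equal_bananas : Prop := ∀ (s : String), Dom_bananas s → Spec_bananas s (bananas s)

-- ===== LEMMAS AND PROOFS =====

-- All strictly increasing r-tuples of indices drawn from [start, L), in lexicographic order.
def pvTups (L : Int) : Nat → Int → List (List Int)
  | 0, _ => [[]]
  | r + 1, start =>
      (PySem.List.pyRange start (L - (r : Int))).flatMap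
        (fun p => (pvTups L r (p + 1)).map (p :: ·))

theorem pvTups_zero (L : Int) (start : Int) : pvTups L 0 start = [[]] := rfl

theorem pvTups_succ (L : Int) (r r' : Nat) (h : r = r' + 1) (start : Int) :
    pvTups L r start
      = (PySem.List.pyRange start (L - (r' : Int))).flatMap
          (fun p => (pvTups L r' (p + 1)).map (p :: ·)) := by
  subst h; rfl

-- a fold of conditional Set.add is a Set.update by the matching sublist
theorem pv_foldl_set_add_if {α β : Type} [BEq β] (l : List α) (C : α → Bool) (f : α → β)
    (r : PySem.Set β) :
    l.foldl (fun r x => if C x then PySem.Set.add r (f x) else r) r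
      = PySem.Set.update r (l.flatMap (fun x => if C x then [f x] else [])) := by
  induction l generalizing r with
  | nil => rfl
  | cons a t ih =>
    rw [List.foldl_cons, List.flatMap_cons, ih]
    cases hca : C a <;> simp [PySem.Set.update]

-- a fold of Set.update is a Set.update by the flatMap
theorem pv_foldl_set_update {α β : Type} [BEq β] (l : List α) (g : α → List β)
    (r : PySem.Set β) :
    l.foldl (fun r x => PySem.Set.update r (g x)) r = PySem.Set.update r (l.flatMap g) := by
  induction l generalizing r with
  | nil => rfl
  | cons a t ih =>
    rw [List.foldl_cons, List.flatMap_cons, ih]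
    simp [PySem.Set.update, List.foldl_append]

-- the sliced rebuild `hw[:zz] + "-" + hw[zz+1:]` sets position zz to '-'
theorem pv_slice_set (hw : List Char) (zz : Int) (h0 : 0 ≤ zz) (h1 : zz < (hw.length : Int)) :
    PySem.List.slice hw none (some zz) ++ ['-'] ++ PySem.List.slice hw (some (zz + 1)) none
      = hw.set zz.toNat '-' := by
  rw [PySem.List.slice_to hw h0, PySem.List.slice_from hw (by omega : (0:Int) ≤ zz + 1)]
  have hzz : (zz + 1).toNat = zz.toNat + 1 := by omega
  rw [hzz, List.set_eq_take_append_cons_drop, if_pos (by omega)]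
  simp

-- one iteration of A's inner break loop
theorem pv_step_cons (n zz z : Int) (hw : List Char) (rest : List Int) :
    bananasMaskStep n zz hw (z :: rest)
      = if zz = z then hw
        else if zz ≠ z ∧ (z > zz ∨ n < zz) then
          PySem.List.slice hw none (some zz) ++ ['-'] ++ PySem.List.slice hw (some (zz + 1)) none
        else bananasMaskStep n zz hw rest := rfl

theorem pv_step_nil (n zz : Int) (hw : List Char) : bananasMaskStep n zz hw [] = hw := rfl

-- characterization of A's inner break loop: keep picked positions, dash everything else
theorem pv_maskstep (hw : List Char) (i j k l m n zz : Int)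
    (hij : i < j) (hjk : j < k) (hkl : k < l) (hlm : l < m) (hmn : m < n)
    (h0 : 0 ≤ zz) (h1 : zz < (hw.length : Int)) :
    bananasMaskStep n zz hw [i, j, k, l, m, n]
      = if zz = i ∨ zz = j ∨ zz = k ∨ zz = l ∨ zz = m ∨ zz = n then hw
        else hw.set zz.toNat '-' := by
  rw [pv_step_cons, pv_step_cons, pv_step_cons, pv_step_cons, pv_step_cons, pv_step_cons,
    pv_step_nil, pv_slice_set hw zz h0 h1]
  by_cases hz1 : zz = i
  · rw [if_pos hz1, if_pos (by omega)]
  · rw [if_neg hz1]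
    by_cases hc1 : i > zz ∨ n < zz
    · rw [if_pos ⟨hz1, hc1⟩, if_neg (by omega)]
    · rw [if_neg (fun hc => hc1 hc.2)]
      by_cases hz2 : zz = j
      · rw [if_pos hz2, if_pos (by omega)]
      · rw [if_neg hz2]
        by_cases hc2 : j > zz ∨ n < zz
        · rw [if_pos ⟨hz2, hc2⟩, if_neg (by omega)]
        · rw [if_neg (fun hc => hc2 hc.2)]
          by_cases hz3 : zz = k
          · rw [if_pos hz3, if_pos (by omega)]
          · rw [if_neg hz3]
            by_cases hc3 : k > zz ∨ n < zz
            · rw [if_pos ⟨hz3, hc3⟩, if_neg (by omega)]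
            · rw [if_neg (fun hc => hc3 hc.2)]
              by_cases hz4 : zz = l
              · rw [if_pos hz4, if_pos (by omega)]
              · rw [if_neg hz4]
                by_cases hc4 : l > zz ∨ n < zz
                · rw [if_pos ⟨hz4, hc4⟩, if_neg (by omega)]
                · rw [if_neg (fun hc => hc4 hc.2)]
                  by_cases hz5 : zz = m
                  · rw [if_pos hz5, if_pos (by omega)]
                  · rw [if_neg hz5]
                    by_cases hc5 : m > zz ∨ n < zz
                    · rw [if_pos ⟨hz5, hc5⟩, if_neg (by omega)]
                    · rw [if_neg (fun hc => hc5 hc.2)]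
                      by_cases hz6 : zz = n
                      · rw [if_pos hz6, if_pos (by omega)]
                      · rw [if_neg hz6]
                        by_cases hc6 : n > zz ∨ n < zz
                        · rw [if_pos ⟨hz6, hc6⟩, if_neg (by omega)]
                        · exact absurd (by omega : n > zz ∨ n < zz) hc6

-- the masking fold, processed from position a on
theorem pv_mask_fold (i j k l m n : Int)
    (hij : i < j) (hjk : j < k) (hkl : k < l) (hlm : l < m) (hmn : m < n) :
    ∀ (fuel : Nat) (a : Int) (hw : List Char), 0 ≤ a → (hw.length : Int) - a.toNat = fuel →
    (PySem.List.pyRange a (hw.length : Int)).foldl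
        (fun hw zz => bananasMaskStep n zz hw [i, j, k, l, m, n]) hw
      = hw.zipIdx.map (fun p =>
          if (p.2 : Int) < a ∨ (p.2 : Int) = i ∨ (p.2 : Int) = j ∨ (p.2 : Int) = k
              ∨ (p.2 : Int) = l ∨ (p.2 : Int) = m ∨ (p.2 : Int) = n then p.1 else '-') := by
  intro fuel
  induction fuel with
  | zero =>
    intro a hw ha hfuel
    rw [PySem.List.pyRange_one_eq_nil (by omega), List.foldl_nil]
    refine (List.ext_getElem (by simp) ?_).symm
    intro t ht1 ht2
    simp only [List.getElem_map, List.getElem_zipIdx, Nat.zero_add]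
    rw [if_pos (Or.inl (by omega : ((t : Nat) : Int) < a))]
  | succ fuel ih =>
    intro a hw ha hfuel
    have haL : a < (hw.length : Int) := by omega
    rw [PySem.List.pyRange_one_cons haL, List.foldl_cons,
      pv_maskstep hw i j k l m n a hij hjk hkl hlm hmn ha haL]
    have hlen : ((if a = i ∨ a = j ∨ a = k ∨ a = l ∨ a = m ∨ a = n then hw
        else hw.set a.toNat '-').length : Int) = (hw.length : Int) := by
      split_ifs <;> simp
    rw [show (hw.length : Int) = ((if a = i ∨ a = j ∨ a = k ∨ a = l ∨ a = m ∨ a = n then hw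
        else hw.set a.toNat '-').length : Int) from hlen.symm]
    rw [ih (a + 1) _ (by omega) (by rw [hlen]; omega)]
    refine List.ext_getElem (by split_ifs <;> simp) ?_
    intro t ht1 ht2
    have htlen : t < hw.length := by
      simp only [List.length_map, List.length_zipIdx] at ht2; exact ht2
    by_cases hcase : a = i ∨ a = j ∨ a = k ∨ a = l ∨ a = m ∨ a = n
    · simp only [if_pos hcase, List.getElem_map, List.getElem_zipIdx, Nat.zero_add]
      refine if_congr ?_ rfl rfl
      constructor <;> intro h' <;> omega
    · simp only [if_neg hcase, List.getElem_map, List.getElem_zipIdx, Nat.zero_add,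
        List.getElem_set]
      by_cases hta : a.toNat = t
      · rw [if_pos hta, ite_self]
        rw [if_neg (show ¬((t : Int) < a ∨ (t : Int) = i ∨ (t : Int) = j ∨ (t : Int) = k
            ∨ (t : Int) = l ∨ (t : Int) = m ∨ (t : Int) = n) by omega)]
      · rw [if_neg hta]
        refine if_congr ?_ rfl rfl
        constructor <;> intro h' <;> omega

-- A's mask equals B's mask on a strictly increasing in-range pick tuple
theorem pv_mask_eq (cs : List Char) (i j k l m n : Int)
    (hij : i < j) (hjk : j < k) (hkl : k < l) (hlm : l < m) (hmn : m < n)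
    (_h0 : 0 ≤ i) (_hL : n < (cs.length : Int)) :
    bananasMask cs i j k l m n (cs.length : Int) = bananasAltMask cs [i, j, k, l, m, n] := by
  unfold bananasMask bananasAltMask
  rw [pv_mask_fold i j k l m n hij hjk hkl hlm hmn (cs.length) 0 cs le_rfl (by simp)]
  rw [PySem.List.enumerate_eq_zipIdx_map, List.map_map]
  refine List.map_congr_left ?_
  intro p hp
  have hcont : ([i, j, k, l, m, n].contains ((0 : Int) + (p.2 : Int)) = true)
      ↔ ((p.2 : Int) = i ∨ (p.2 : Int) = j ∨ (p.2 : Int) = k ∨ (p.2 : Int) = l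
          ∨ (p.2 : Int) = m ∨ (p.2 : Int) = n) := by
    simp
  have hnn : (0 : Int) ≤ (p.2 : Int) := Int.natCast_nonneg _
  simp only [Function.comp]
  by_cases hc : (p.2 : Int) = i ∨ (p.2 : Int) = j ∨ (p.2 : Int) = k ∨ (p.2 : Int) = l
      ∨ (p.2 : Int) = m ∨ (p.2 : Int) = n
  · rw [if_pos (by omega), if_pos (hcont.mpr hc)]
  · rw [if_neg (by omega), if_neg (fun h => hc (hcont.mp h))]

-- B's recursion enumerates exactly the letter-matching increasing tuples
theorem pv_altRec_eq (cs : List Char) (L : Int) : ∀ (rest : List Char) (start : Int)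
    (picks : List Int),
    bananasAltRec cs L start picks rest
      = (pvTups L rest.length start).flatMap
          (fun ps => if (ps.zip rest).all (fun pc => PySem.List.pyGetD cs pc.1 ' ' == pc.2)
                     then [String.ofList (bananasAltMask cs (picks ++ ps))] else []) := by
  intro rest
  induction rest with
  | nil => intro start picks; simp [bananasAltRec, pvTups]
  | cons c rest ih =>
    intro start picks
    show (PySem.List.pyRange start (L - ((rest.length : Int) + 1) + 1)).foldl _ [] = _
    have hb : L - ((rest.length : Int) + 1) + 1 = L - (rest.length : Int) := by ring
    rw [hb]
    have hbody : (fun (words : List String) (p : Int) =>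
        if PySem.List.pyGetD cs p ' ' == c then
          words ++ bananasAltRec cs L (p + 1) (picks ++ [p]) rest
        else words)
      = (fun words p => words ++
          (if PySem.List.pyGetD cs p ' ' == c then
            bananasAltRec cs L (p + 1) (picks ++ [p]) rest else [])) := by
      funext words p; split_ifs <;> simp
    rw [hbody, PySem.List.foldl_append_eq_flatMap, List.nil_append]
    show _ = (pvTups L (rest.length + 1) start).flatMap _
    rw [pvTups_succ L (rest.length + 1) rest.length rfl]
    simp only [List.flatMap_assoc, List.flatMap_map]
    refine List.flatMap_congr ?_
    intro p _
    rw [ih (p + 1) (picks ++ [p])]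
    by_cases hc : (PySem.List.pyGetD cs p ' ' == c) = true
    · rw [if_pos hc]
      refine List.flatMap_congr ?_
      intro ps _
      simp only [List.zip_cons_cons, List.all_cons, hc, Bool.true_and, List.append_assoc,
        List.singleton_append]
    · rw [if_neg hc]
      have hnil : ∀ ps ∈ pvTups L rest.length (p + 1),
          (if ((p :: ps).zip (c :: rest)).all
              (fun pc => PySem.List.pyGetD cs pc.1 ' ' == pc.2)
           then [String.ofList (bananasAltMask cs (picks ++ p :: ps))] else [])
            = ([] : List String) := by
        intro ps _
        rw [if_neg]
        simp only [List.zip_cons_cons, List.all_cons, Bool.and_eq_true]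
        intro h
        exact hc h.1
      rw [List.flatMap_congr hnil]
      simp

-- destructure a 6-element list
theorem pv_len6 {α : Type} (ps : List α) (h : ps.length = 6) :
    ∃ i j k l m n, ps = [i, j, k, l, m, n] := by
  match ps, h with
  | [i, j, k, l, m, n], _ => exact ⟨i, j, k, l, m, n, rfl⟩

-- ===== VERDICT (by name: the statement is the Claim_ definition above) =====
set_option maxHeartbeats 1000000 in
theorem bananas_spec : Claim_equal_bananas := by
  intro s _
  unfold Spec_bananas bananas bananas_alt
  rw [PySem.Str.len_eq]
  set cs := s.toList with hcs
  rw [pv_altRec_eq, show ("banana".toList).length = 6 from rfl]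
  simp only [show "banana".toList = ['b', 'a', 'n', 'a', 'n', 'a'] from rfl]
  by_cases hL : (cs.length : Int) > 6
  · -- main case: length > 6
    rw [if_pos hL]
    have h6 : (((cs.length : Int) == 6) && (s == "banana")) = false := by
      have : ((cs.length : Int) == 6) = false := by simp; omega
      simp [this]
    rw [h6]
    simp only [Bool.false_eq_true, if_false]
    simp only [pv_foldl_set_add_if, pv_foldl_set_update]
    rw [PySem.Set.ofList_eq_foldl]
    show PySem.Set.update PySem.Set.empty _ = List.foldl PySem.Set.add PySem.Set.empty _
    show PySem.Set.update PySem.Set.empty _ = PySem.Set.update PySem.Set.empty _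
    congr 1
    have hexp : ∀ h : List Int → List String,
        (pvTups (cs.length : Int) 6 0).flatMap h =
          (PySem.List.pyRange 0 ((cs.length : Int) - 5)).flatMap (fun i =>
            (PySem.List.pyRange (i + 1) ((cs.length : Int) - 4)).flatMap (fun j =>
              (PySem.List.pyRange (j + 1) ((cs.length : Int) - 3)).flatMap (fun k =>
                (PySem.List.pyRange (k + 1) ((cs.length : Int) - 2)).flatMap (fun l =>
                  (PySem.List.pyRange (l + 1) ((cs.length : Int) - 1)).flatMap (fun m =>
                    (PySem.List.pyRange (m + 1) (cs.length : Int)).flatMap (fun n =>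
                      h [i, j, k, l, m, n])))))) := by
      intro h
      simp only [pvTups_succ (cs.length : Int) 6 5 rfl,
        pvTups_succ (cs.length : Int) 5 4 rfl, pvTups_succ (cs.length : Int) 4 3 rfl,
        pvTups_succ (cs.length : Int) 3 2 rfl, pvTups_succ (cs.length : Int) 2 1 rfl,
        pvTups_succ (cs.length : Int) 1 0 rfl, pvTups_zero,
        List.flatMap_assoc, List.flatMap_map]
      norm_num
    rw [hexp]
    refine List.flatMap_congr ?_; intro i hi
    refine List.flatMap_congr ?_; intro j hj
    refine List.flatMap_congr ?_; intro k hk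
    refine List.flatMap_congr ?_; intro l hl
    refine List.flatMap_congr ?_; intro m hm
    refine List.flatMap_congr ?_; intro n hn
    rw [PySem.List.mem_pyRange_one] at hi hj hk hl hm hn
    have hmask := pv_mask_eq cs i j k l m n (by omega) (by omega) (by omega) (by omega)
      (by omega) (by omega) (by omega)
    show (if _ then [String.ofList (bananasMask cs i j k l m n (cs.length : Int))] else _) = _
    rw [hmask]
    rfl
  · -- length ≤ 6
    rw [if_neg hL]
    by_cases h6 : cs.length = 6
    · -- length = 6 : A adds s iff s == "banana"
      have htups : pvTups ((cs.length : Nat) : Int) 6 0 = [[0, 1, 2, 3, 4, 5]] := by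
        rw [h6]; decide
      rw [htups]
      simp only [List.flatMap_cons, List.flatMap_nil, List.append_nil]
      by_cases hs : s = "banana"
      · subst hs
        rw [hcs]
        decide
      · have hcond : (((cs.length : Int) == 6) && (s == "banana")) = false := by
          have : (s == "banana") = false := by simpa using hs
          simp [this]
        rw [hcond]
        simp only [Bool.false_eq_true, if_false]
        have hcond2 : (([(0 : Int), 1, 2, 3, 4, 5].zip ['b', 'a', 'n', 'a', 'n', 'a']).all
            (fun pc => PySem.List.pyGetD cs pc.1 ' ' == pc.2)) = false := by
          cases hbool : (([(0 : Int), 1, 2, 3, 4, 5].zip ['b', 'a', 'n', 'a', 'n', 'a']).all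
            (fun pc => PySem.List.pyGetD cs pc.1 ' ' == pc.2)) with
          | false => rfl
          | true =>
            exfalso
            apply hs
            obtain ⟨c0, c1, c2, c3, c4, c5, hcs6⟩ := pv_len6 cs h6
            rw [hcs6] at hbool
            rw [show ([(0 : Int), 1, 2, 3, 4, 5].zip ['b', 'a', 'n', 'a', 'n', 'a'])
                = [((0 : Int), 'b'), ((1 : Int), 'a'), ((2 : Int), 'n'), ((3 : Int), 'a'),
                   ((4 : Int), 'n'), ((5 : Int), 'a')] from rfl] at hbool
            simp only [List.all_cons, List.all_nil, Bool.and_eq_true, Bool.and_true,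
              beq_iff_eq] at hbool
            obtain ⟨e0, e1, e2, e3, e4, e5⟩ := hbool
            rw [show PySem.List.pyGetD [c0, c1, c2, c3, c4, c5] (0 : Int) ' ' = c0 from rfl] at e0
            rw [show PySem.List.pyGetD [c0, c1, c2, c3, c4, c5] (1 : Int) ' ' = c1 from rfl] at e1
            rw [show PySem.List.pyGetD [c0, c1, c2, c3, c4, c5] (2 : Int) ' ' = c2 from rfl] at e2
            rw [show PySem.List.pyGetD [c0, c1, c2, c3, c4, c5] (3 : Int) ' ' = c3 from rfl] at e3
            rw [show PySem.List.pyGetD [c0, c1, c2, c3, c4, c5] (4 : Int) ' ' = c4 from rfl] at e4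
            rw [show PySem.List.pyGetD [c0, c1, c2, c3, c4, c5] (5 : Int) ' ' = c5 from rfl] at e5
            have hsof : s = String.ofList cs := by rw [hcs]; simp
            rw [hsof, hcs6, e0, e1, e2, e3, e4, e5]
        rw [hcond2]
        simp only [Bool.false_eq_true, if_false]
        rfl
    · -- length < 6 : both sides empty
      have hcond : (((cs.length : Int) == 6) && (s == "banana")) = false := by
        have : ((cs.length : Int) == 6) = false := by simp; omega
        simp [this]
      rw [hcond]
      simp only [Bool.false_eq_true, if_false]
      have htups : pvTups ((cs.length : Nat) : Int) 6 0 = [] := by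
        rw [pvTups_succ _ 6 5 rfl]
        rw [PySem.List.pyRange_one_eq_nil (by push_cast; omega)]
        rfl
      rw [htups]
      rfl
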